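-- pv_equiv track=rewrite | github.com/JasonPeng2019/Math-Induction-Head | src/operator_buckets.py | _sub_answer_and_borrows
-- ===== SOURCE A (Python) =====
-- from typing import Any, Dict, Iterable, List, Mapping, Optional, Sequence, Tuple
--
-- def _sub_answer_and_borrows(a: int, b: int) -> Tuple[int, List[int]]:
--     if a < b:
--         raise ValueError("Borrow analysis currently expects a >= b")
--     borrow = 0
--     borrow_positions: List[int] = []
--     place = 0
--     aa = a
--     bb = b
--     while aa > 0 or bb > 0:
--         da = aa % 10
--         db = bb % 10
--         da -= borrow
--         if da < db:
--             da += 10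
--             borrow = 1
--             borrow_positions.append(place)
--         else:
--             borrow = 0
--         aa //= 10
--         bb //= 10
--         place += 1
--     return a - b, borrow_positions
-- ===== SOURCE B (Python) =====
-- from typing import List, Tuple
--
-- def _sub_answer_and_borrows(a: int, b: int) -> Tuple[int, List[int]]:
--     if a < b:
--         raise ValueError("Borrow analysis currently expects a >= b")
--     borrow_positions: List[int] = []
--     place = 0
--     # A borrow leaves decimal position `place` iff the low prefix of a (mod 10**(place+1))
--     # is smaller than the same prefix of b; no sequential borrow state is needed.
--     while a >= 10 ** place or b >= 10 ** place:
--         if a % 10 ** (place + 1) < b % 10 ** (place + 1):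
--             borrow_positions.append(place)
--         place += 1
--     return a - b, borrow_positions
-- ===== Notes on version B (the rewrite author's own statement) =====
-- stated objective: alternative
-- what changed: B drops the sequential borrow/digit state machine: each borrow position is decided independently by the prefix comparison a % 10**(i+1) < b % 10**(i+1), so no carried borrow variable or digit arithmetic remains.
import Mathlib
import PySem

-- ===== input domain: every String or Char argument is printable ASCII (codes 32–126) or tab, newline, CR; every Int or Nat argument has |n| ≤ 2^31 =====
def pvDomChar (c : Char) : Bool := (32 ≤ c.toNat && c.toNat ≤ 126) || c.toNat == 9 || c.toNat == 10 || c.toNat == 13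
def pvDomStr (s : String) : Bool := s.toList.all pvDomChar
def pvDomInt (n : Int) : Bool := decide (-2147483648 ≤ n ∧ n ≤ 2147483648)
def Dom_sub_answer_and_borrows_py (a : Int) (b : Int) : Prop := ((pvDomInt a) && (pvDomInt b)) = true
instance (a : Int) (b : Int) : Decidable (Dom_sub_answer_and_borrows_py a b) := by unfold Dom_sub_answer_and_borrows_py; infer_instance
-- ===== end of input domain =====

-- B replaces A's sequential borrow/digit state machine by an independent per-position
-- prefix comparison (a % 10^(i+1) < b % 10^(i+1)); same cost, no carried borrow state.

-- (10^k:Int).toNat = 10^k, used by both termination arguments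
theorem pv_toNat_pow (k : Nat) : ((10:Int) ^ k).toNat = 10 ^ k := by
  have h : ((10:Int) ^ k) = ((10 ^ k : Nat) : Int) := by push_cast; ring
  rw [h, Int.toNat_natCast]

theorem pv_fd_toNat_le (x : Int) : (PySem.Int.floordiv x 10).toNat ≤ x.toNat := by
  rw [PySem.Int.floordiv_eq_ediv_of_pos (by norm_num)]
  have h1 := Int.emod_nonneg x (by norm_num : (10:Int) ≠ 0)
  have h2 := Int.emod_lt_of_pos x (by norm_num : (0:Int) < 10)
  have h3 := Int.mul_ediv_add_emod x 10
  omega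

theorem pv_fd_toNat_lt (x : Int) (hx : 0 < x) : (PySem.Int.floordiv x 10).toNat < x.toNat := by
  rw [PySem.Int.floordiv_eq_ediv_of_pos (by norm_num)]
  have h1 := Int.emod_nonneg x (by norm_num : (10:Int) ≠ 0)
  have h2 := Int.emod_lt_of_pos x (by norm_num : (0:Int) < 10)
  have h3 := Int.mul_ediv_add_emod x 10
  omega

-- ===== PORT A =====
-- while aa > 0 or bb > 0: digit subtraction with carried borrow, collecting borrow places
def pvALoop (aa bb borrow : Int) (pos : List Int) (place : Int) : List Int :=
  if aa > 0 ∨ bb > 0 then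
    let da := PySem.Int.mod aa 10 - borrow
    let db := PySem.Int.mod bb 10
    if da < db then
      pvALoop (PySem.Int.floordiv aa 10) (PySem.Int.floordiv bb 10) 1 (pos ++ [place]) (place + 1)
    else
      pvALoop (PySem.Int.floordiv aa 10) (PySem.Int.floordiv bb 10) 0 pos (place + 1)
  else pos
termination_by aa.toNat + bb.toNat
decreasing_by
  · rcases ‹aa > 0 ∨ bb > 0› with h | h
    · have h1 := pv_fd_toNat_lt aa h; have h2 := pv_fd_toNat_le bb; omega
    · have h1 := pv_fd_toNat_le aa; have h2 := pv_fd_toNat_lt bb h; omega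
  · rcases ‹aa > 0 ∨ bb > 0› with h | h
    · have h1 := pv_fd_toNat_lt aa h; have h2 := pv_fd_toNat_le bb; omega
    · have h1 := pv_fd_toNat_le aa; have h2 := pv_fd_toNat_lt bb h; omega

-- a < b raises ValueError in Python; those inputs are excluded by Pre_ below
def sub_answer_and_borrows_py (a : Int) (b : Int) : Int × List Int :=
  if a < b then (a - b, [])
  else (a - b, pvALoop a b 0 [] 0)

-- ===== PORT B =====
-- while a >= 10**place or b >= 10**place: append place iff a % 10**(place+1) < b % 10**(place+1)
def pvBLoop (a b : Int) (place : Nat) : List Int :=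
  if a ≥ (10:Int) ^ place ∨ b ≥ (10:Int) ^ place then
    (if PySem.Int.mod a ((10:Int) ^ (place + 1)) < PySem.Int.mod b ((10:Int) ^ (place + 1))
       then [(place : Int)] else []) ++ pvBLoop a b (place + 1)
  else []
termination_by a.toNat + b.toNat + 1 - 10 ^ place
decreasing_by
  have hp : (10:Nat) ^ place ≤ a.toNat + b.toNat := by
    have hc : ((10:Int) ^ place).toNat = 10 ^ place := pv_toNat_pow place
    rcases ‹a ≥ (10:Int) ^ place ∨ b ≥ (10:Int) ^ place› with h | h
    · have : ((10:Int) ^ place).toNat ≤ a.toNat := by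
        have hpos : (0:Int) < 10 ^ place := by positivity
        omega
      omega
    · have : ((10:Int) ^ place).toNat ≤ b.toNat := by
        have hpos : (0:Int) < 10 ^ place := by positivity
        omega
      omega
  have hlt : (10:Nat) ^ place < 10 ^ (place + 1) := by
    have := Nat.pow_lt_pow_succ (a := 10) (by norm_num) (n := place)
    omega
  omega

def sub_answer_and_borrows_py_alt (a : Int) (b : Int) : Int × List Int :=
  if a < b then (a - b, [])
  else (a - b, pvBLoop a b 0)

-- ===== PRECONDITION & SPEC =====
-- Pre_ excludes a < b, where Python A raises ValueError (B raises the same error there).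
def Pre_sub_answer_and_borrows_py (a : Int) (b : Int) : Prop := b ≤ a
instance (a : Int) (b : Int) : Decidable (Pre_sub_answer_and_borrows_py a b) := by unfold Pre_sub_answer_and_borrows_py; infer_instance
def pvWitness_sub_answer_and_borrows_py : Int × Int := (103, 47)

def Spec_sub_answer_and_borrows_py (a : Int) (b : Int) (out : Int × List Int) : Prop := out = sub_answer_and_borrows_py_alt a b
instance (a : Int) (b : Int) (out : Int × List Int) : Decidable (Spec_sub_answer_and_borrows_py a b out) := by unfold Spec_sub_answer_and_borrows_py; infer_instance

-- ===== CLAIM (what is proved, stated in full; the proofs are below) =====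
def Claim_equal_sub_answer_and_borrows_py : Prop := ∀ (a : Int) (b : Int), Dom_sub_answer_and_borrows_py a b → Pre_sub_answer_and_borrows_py a b → Spec_sub_answer_and_borrows_py a b (sub_answer_and_borrows_py a b)

-- ===== LEMMAS AND PROOFS =====

-- loop-condition bridge: a // 10^k > 0  ↔  a ≥ 10^k
theorem pv_cond_iff (x : Int) (k : Nat) :
    0 < PySem.Int.floordiv x ((10:Int) ^ k) ↔ (10:Int) ^ k ≤ x := by
  have hpos : (0:Int) < 10 ^ k := by positivity
  rw [show (0:Int) < PySem.Int.floordiv x ((10:Int) ^ k) ↔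
        (1:Int) ≤ PySem.Int.floordiv x ((10:Int) ^ k) from by omega,
      PySem.Int.le_floordiv_iff_mul_le hpos, one_mul]

-- floordiv composition: (x // 10^k) // 10 = x // 10^(k+1)
theorem pv_fd_comp (x : Int) (k : Nat) :
    PySem.Int.floordiv (PySem.Int.floordiv x ((10:Int) ^ k)) 10
      = PySem.Int.floordiv x ((10:Int) ^ (k + 1)) := by
  have hpos : (0:Int) < 10 ^ k := by positivity
  rw [PySem.Int.floordiv_eq_ediv_of_pos hpos,
      PySem.Int.floordiv_eq_ediv_of_pos (by norm_num : (0:Int) < 10),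
      PySem.Int.floordiv_eq_ediv_of_pos (by positivity : (0:Int) < 10 ^ (k+1)),
      Int.ediv_ediv_of_nonneg (le_of_lt hpos), pow_succ]

-- digit decomposition: x % 10^(k+1) = 10^k * ((x // 10^k) % 10) + x % 10^k
theorem pv_digit (x : Int) (k : Nat) :
    PySem.Int.mod x ((10:Int) ^ (k + 1))
      = 10 ^ k * PySem.Int.mod (PySem.Int.floordiv x ((10:Int) ^ k)) 10
        + PySem.Int.mod x ((10:Int) ^ k) := by
  have hpos : (0:Int) < 10 ^ k := by positivity
  rw [PySem.Int.mod_eq_emod_of_pos (by positivity : (0:Int) < 10 ^ (k+1)),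
      PySem.Int.mod_eq_emod_of_pos (by norm_num : (0:Int) < 10),
      PySem.Int.mod_eq_emod_of_pos hpos,
      PySem.Int.floordiv_eq_ediv_of_pos hpos]
  set q := x / 10 ^ k with hq
  set r := x % 10 ^ k with hr
  have hx : x = 10 ^ k * q + r := by rw [hq, hr]; linarith [Int.emod_add_mul_ediv x (10 ^ k)]
  have hq10 : q = 10 * (q / 10) + q % 10 := by have := Int.emod_add_mul_ediv q 10; omega
  have hr0 : 0 ≤ r := Int.emod_nonneg x (by positivity)
  have hr1 : r < 10 ^ k := Int.emod_lt_of_pos x hpos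
  have hm0 : 0 ≤ q % 10 := Int.emod_nonneg q (by norm_num)
  have hm1 : q % 10 < 10 := Int.emod_lt_of_pos q (by norm_num)
  have hxx : x = 10 ^ (k + 1) * (q / 10) + (10 ^ k * (q % 10) + r) := by
    rw [pow_succ]; nlinarith [hx, hq10]
  have hb : 10 ^ k * (q % 10) + r < 10 ^ (k + 1) := by
    have : 10 ^ k * (q % 10) + r < 10 ^ k * (q % 10 + 1) := by nlinarith
    have h2 : 10 ^ k * (q % 10 + 1) ≤ 10 ^ k * 10 := by nlinarith
    rw [pow_succ]; nlinarith
  calc x % 10 ^ (k + 1)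
      = (10 ^ k * (q % 10) + r + 10 ^ (k + 1) * (q / 10)) % 10 ^ (k + 1) := by
        rw [show 10 ^ k * (q % 10) + r + 10 ^ (k + 1) * (q / 10) = x by nlinarith [hxx]]
    _ = (10 ^ k * (q % 10) + r) % 10 ^ (k + 1) := by
        rw [Int.add_mul_emod_self_left]
    _ = 10 ^ k * (q % 10) + r := Int.emod_eq_of_lt (by nlinarith) hb

-- branch bridge: digit-with-borrow comparison ↔ prefix comparison one place wider
theorem pv_branch (a b : Int) (k : Nat) :
    (PySem.Int.mod (PySem.Int.floordiv a ((10:Int) ^ k)) 10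
       - (if PySem.Int.mod a ((10:Int) ^ k) < PySem.Int.mod b ((10:Int) ^ k) then (1:Int) else 0)
     < PySem.Int.mod (PySem.Int.floordiv b ((10:Int) ^ k)) 10)
    ↔ PySem.Int.mod a ((10:Int) ^ (k + 1)) < PySem.Int.mod b ((10:Int) ^ (k + 1)) := by
  have hpos : (0:Int) < 10 ^ k := by positivity
  rw [pv_digit a k, pv_digit b k]
  set A1 := PySem.Int.mod (PySem.Int.floordiv a ((10:Int) ^ k)) 10 with hA1
  set B1 := PySem.Int.mod (PySem.Int.floordiv b ((10:Int) ^ k)) 10 with hB1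
  set ra := PySem.Int.mod a ((10:Int) ^ k) with hra
  set rb := PySem.Int.mod b ((10:Int) ^ k) with hrb
  have hA : 0 ≤ A1 ∧ A1 < 10 :=
    ⟨PySem.Int.mod_nonneg _ (by norm_num), PySem.Int.mod_lt _ (by norm_num)⟩
  have hB : 0 ≤ B1 ∧ B1 < 10 :=
    ⟨PySem.Int.mod_nonneg _ (by norm_num), PySem.Int.mod_lt _ (by norm_num)⟩
  have hrA : 0 ≤ ra ∧ ra < 10 ^ k := ⟨PySem.Int.mod_nonneg _ hpos, PySem.Int.mod_lt _ hpos⟩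
  have hrB : 0 ≤ rb ∧ rb < 10 ^ k := ⟨PySem.Int.mod_nonneg _ hpos, PySem.Int.mod_lt _ hpos⟩
  split_ifs with hbor
  · -- borrow in: ra < rb;  A1 - 1 < B1 ↔ A1 ≤ B1
    constructor
    · intro h
      have : A1 ≤ B1 := by omega
      rcases lt_or_eq_of_le this with h2 | h2
      · nlinarith [mul_le_mul_of_nonneg_left (show A1 + 1 ≤ B1 by omega) (le_of_lt hpos)]
      · rw [h2]; omega
    · intro h
      by_contra hc
      have : B1 + 1 ≤ A1 := by omega
      nlinarith [mul_le_mul_of_nonneg_left this (le_of_lt hpos)]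
  · -- no borrow: rb ≤ ra;  A1 < B1
    constructor
    · intro h
      nlinarith [mul_le_mul_of_nonneg_left (show A1 + 1 ≤ B1 by omega) (le_of_lt hpos)]
    · intro h
      by_contra hc
      have : B1 ≤ A1 := by omega
      nlinarith [mul_le_mul_of_nonneg_left this (le_of_lt hpos)]

-- main invariant: A's loop from digit position k equals B's loop from k
theorem pv_main (a b : Int) (pos : List Int) (k : Nat) :
    pvALoop (PySem.Int.floordiv a ((10:Int) ^ k)) (PySem.Int.floordiv b ((10:Int) ^ k))
        (if PySem.Int.mod a ((10:Int) ^ k) < PySem.Int.mod b ((10:Int) ^ k) then 1 else 0)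
        pos (k : Int)
      = pos ++ pvBLoop a b k := by
  rw [pvALoop, pvBLoop]
  by_cases hc : (10:Int) ^ k ≤ a ∨ (10:Int) ^ k ≤ b
  · have hcA : 0 < PySem.Int.floordiv a ((10:Int) ^ k) ∨ 0 < PySem.Int.floordiv b ((10:Int) ^ k) := by
      rcases hc with h | h
      · exact Or.inl ((pv_cond_iff a k).2 h)
      · exact Or.inr ((pv_cond_iff b k).2 h)
    rw [if_pos hcA, if_pos hc]
    have hbr := pv_branch a b k
    by_cases hlt : PySem.Int.mod a ((10:Int) ^ (k + 1)) < PySem.Int.mod b ((10:Int) ^ (k + 1))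
    · rw [if_pos (hbr.2 hlt)]
      have hrec := pv_main a b (pos ++ [(k : Int)]) (k + 1)
      rw [pv_fd_comp a k, pv_fd_comp b k, if_pos hlt] at *
      rw [show ((k : Int) + 1) = ((k + 1 : Nat) : Int) by push_cast; ring, hrec,
          List.append_assoc]
    · rw [if_neg (fun h => hlt (hbr.1 h))]
      have hrec := pv_main a b pos (k + 1)
      rw [pv_fd_comp a k, pv_fd_comp b k, if_neg hlt] at *
      rw [show ((k : Int) + 1) = ((k + 1 : Nat) : Int) by push_cast; ring, hrec]
      simp
  · have hcA : ¬ (0 < PySem.Int.floordiv a ((10:Int) ^ k) ∨ 0 < PySem.Int.floordiv b ((10:Int) ^ k)) := by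
      intro h
      exact hc (h.imp (pv_cond_iff a k).1 (pv_cond_iff b k).1)
    rw [if_neg hcA, if_neg hc]
    simp
termination_by a.toNat + b.toNat + 1 - 10 ^ k
decreasing_by
  all_goals
    have hp : (10:Nat) ^ k ≤ a.toNat + b.toNat := by
      have hcc : ((10:Int) ^ k).toNat = 10 ^ k := pv_toNat_pow k
      have hpos : (0:Int) < 10 ^ k := by positivity
      rcases hc with h | h <;> omega
    have hlt2 : (10:Nat) ^ k < 10 ^ (k + 1) := by
      have := Nat.pow_lt_pow_succ (a := 10) (by norm_num) (n := k)
      omega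
    omega

-- ===== VERDICT (by name: the statement is the Claim_ definition above) =====
theorem sub_answer_and_borrows_py_spec : Claim_equal_sub_answer_and_borrows_py := by
  intro a b _ hpre
  unfold Spec_sub_answer_and_borrows_py sub_answer_and_borrows_py sub_answer_and_borrows_py_alt
  have hab : ¬ a < b := not_lt.2 hpre
  rw [if_neg hab, if_neg hab]
  have h := pv_main a b [] 0
  simp only [pow_zero] at h
  rw [PySem.Int.floordiv_eq_ediv_of_pos (by norm_num : (0:Int) < 1),
      PySem.Int.floordiv_eq_ediv_of_pos (by norm_num : (0:Int) < 1),
      PySem.Int.mod_eq_emod_of_pos (by norm_num : (0:Int) < 1),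
      PySem.Int.mod_eq_emod_of_pos (by norm_num : (0:Int) < 1)] at h
  simp only [Int.ediv_one, Int.emod_one, lt_irrefl, if_false, List.nil_append] at h
  rw [Int.natCast_zero] at h
  rw [h]
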